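-- pv_equiv track=rewrite | github.com/Laerdal/vex-kernel-checker | tests/test_github_priority_logic.py | extract_patch_url_github_first
-- ===== SOURCE A (Python) =====
-- from typing import List, Optional
--
-- def extract_patch_url_github_first(patch_urls: List[str], ignored_urls: set) -> Optional[str]:
--     """Test version of extract_patch_url with GitHub priority."""
--     if not patch_urls:
--         return None
--
--     def url_ignored(url: str) -> bool:
--         return any(ignored_domain in url for ignored_domain in ignored_urls)
--
--     # Prioritize GitHub URLs first (better API availability and reliability)
--     for url in patch_urls:
--         if url_ignored(url):
--             continue
--
--         if 'github.com' in url: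
--             return url
--
--     # Then try kernel.org URLs
--     for url in patch_urls:
--         if url_ignored(url):
--             continue
--
--         if 'git.kernel.org' in url:
--             return url
--
--     # Fall back to any non-ignored URL
--     for url in patch_urls:
--         if not url_ignored(url):
--             return url
--
--     return None
-- ===== SOURCE B (Python) =====
-- from typing import List, Optional
--
-- def extract_patch_url_github_first(patch_urls: List[str], ignored_urls: set) -> Optional[str]:
--     """Single pass: return the first non-ignored github URL immediately;
--     otherwise remember the first non-ignored kernel.org URL and the first
--     non-ignored URL at all, and pick kernel > fallback > None at the end."""
--     if not patch_urls:
--         return None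
--     kernel = None
--     fallback = None
--     for url in patch_urls:
--         if any(d in url for d in ignored_urls):
--             continue
--         if 'github.com' in url:
--             return url
--         if kernel is None and 'git.kernel.org' in url:
--             kernel = url
--         if fallback is None:
--             fallback = url
--     if kernel is not None:
--         return kernel
--     return fallback
-- ===== Notes on version B (the rewrite author's own statement) =====
-- stated objective: faster
-- what changed: Replaces A's three separate passes over patch_urls (each re-testing every URL against all ignored substrings) with a single pass that returns a github URL immediately and otherwise remembers the first kernel.org candidate and the first non-ignored fallback.
import Mathlib
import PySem

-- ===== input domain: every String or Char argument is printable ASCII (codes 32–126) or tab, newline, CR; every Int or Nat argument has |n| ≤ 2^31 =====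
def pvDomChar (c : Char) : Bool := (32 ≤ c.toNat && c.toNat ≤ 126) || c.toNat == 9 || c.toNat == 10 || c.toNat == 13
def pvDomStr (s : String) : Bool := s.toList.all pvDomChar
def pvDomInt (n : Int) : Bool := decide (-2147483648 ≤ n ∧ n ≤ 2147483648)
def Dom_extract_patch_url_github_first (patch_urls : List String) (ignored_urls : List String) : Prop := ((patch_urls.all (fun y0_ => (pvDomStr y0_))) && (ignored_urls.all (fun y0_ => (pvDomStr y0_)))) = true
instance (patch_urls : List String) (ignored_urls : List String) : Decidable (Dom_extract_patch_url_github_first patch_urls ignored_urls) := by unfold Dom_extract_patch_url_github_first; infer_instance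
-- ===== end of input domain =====

-- B is a single pass over patch_urls instead of A's three passes; equal return value, proved below.

-- ===== PORT A =====
-- url_ignored(url): any(d in url for d in ignored_urls)
def pvUrlIgnored (ignored_urls : List String) (url : String) : Bool :=
  ignored_urls.any (fun d => PySem.Str.isIn d url)

-- first loop: first non-ignored url containing 'github.com'
def pvLoopGh (ignored_urls : List String) : List String → Option String
  | [] => none
  | u :: rest =>
      if pvUrlIgnored ignored_urls u then pvLoopGh ignored_urls rest
      else if PySem.Str.isIn "github.com" u then some u
      else pvLoopGh ignored_urls rest

-- second loop: first non-ignored url containing 'git.kernel.org'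
def pvLoopKo (ignored_urls : List String) : List String → Option String
  | [] => none
  | u :: rest =>
      if pvUrlIgnored ignored_urls u then pvLoopKo ignored_urls rest
      else if PySem.Str.isIn "git.kernel.org" u then some u
      else pvLoopKo ignored_urls rest

-- third loop: first non-ignored url
def pvLoopAny (ignored_urls : List String) : List String → Option String
  | [] => none
  | u :: rest =>
      if !pvUrlIgnored ignored_urls u then some u
      else pvLoopAny ignored_urls rest

def extract_patch_url_github_first (patch_urls : List String) (ignored_urls : List String) : Option String :=
  if patch_urls = [] then none
  else
    match pvLoopGh ignored_urls patch_urls with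
    | some u => some u
    | none =>
      match pvLoopKo ignored_urls patch_urls with
      | some u => some u
      | none => pvLoopAny ignored_urls patch_urls

-- ===== PORT B =====
-- single pass carrying (kernel, fallback) candidates
def pvAltGo (ignored_urls : List String) : List String → Option String → Option String → Option String
  | [], kernel, fallback => match kernel with | some k => some k | none => fallback
  | u :: rest, kernel, fallback =>
      if ignored_urls.any (fun d => PySem.Str.isIn d u) then pvAltGo ignored_urls rest kernel fallback
      else if PySem.Str.isIn "github.com" u then some u
      else
        pvAltGo ignored_urls rest
          (if kernel.isNone && PySem.Str.isIn "git.kernel.org" u then some u else kernel)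
          (if fallback.isNone then some u else fallback)

def extract_patch_url_github_first_alt (patch_urls : List String) (ignored_urls : List String) : Option String :=
  if patch_urls = [] then none
  else pvAltGo ignored_urls patch_urls none none

-- ===== PRECONDITION & SPEC =====
def Spec_extract_patch_url_github_first (patch_urls : List String) (ignored_urls : List String) (out : Option String) : Prop := out = extract_patch_url_github_first_alt patch_urls ignored_urls
instance (patch_urls : List String) (ignored_urls : List String) (out : Option String) : Decidable (Spec_extract_patch_url_github_first patch_urls ignored_urls out) := by unfold Spec_extract_patch_url_github_first; infer_instance

-- ===== CLAIM (what is proved, stated in full; the proofs are below) =====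
def Claim_equal_extract_patch_url_github_first : Prop := ∀ (patch_urls : List String) (ignored_urls : List String), Dom_extract_patch_url_github_first patch_urls ignored_urls → Spec_extract_patch_url_github_first patch_urls ignored_urls (extract_patch_url_github_first patch_urls ignored_urls)

-- ===== LEMMAS AND PROOFS =====

-- key invariant: the single pass with stored candidates equals the three-pass chain
lemma pvAltGo_eq (ign : List String) : ∀ (urls : List String) (kernel fallback : Option String),
    pvAltGo ign urls kernel fallback =
      match pvLoopGh ign urls with
      | some u => some u
      | none =>
        match kernel with
        | some k => some k
        | none =>
          match pvLoopKo ign urls with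
          | some u => some u
          | none =>
            match fallback with
            | some f => some f
            | none => pvLoopAny ign urls := by
  intro urls
  induction urls with
  | nil =>
      intro kernel fallback
      cases kernel <;> cases fallback <;> rfl
  | cons u rest ih =>
      intro kernel fallback
      simp only [pvAltGo, pvLoopGh, pvLoopKo, pvLoopAny, pvUrlIgnored]
      by_cases hig : (ign.any fun d => PySem.Str.isIn d u) = true
      · simp only [hig, Bool.not_true, if_true, Bool.false_eq_true, if_false, ih]
      · simp only [Bool.not_eq_true] at hig
        by_cases hgh : PySem.Str.isIn "github.com" u = true
        · simp only [hig, hgh, Bool.false_eq_true, if_false, if_true]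
        · simp only [Bool.not_eq_true] at hgh
          simp only [hig, hgh, Bool.not_false, Bool.false_eq_true, if_false, if_true, ih]
          cases kernel <;> cases fallback <;>
            by_cases hko : PySem.Str.isIn "git.kernel.org" u = true <;>
              simp only [hko, Option.isNone_none, Option.isNone_some, Bool.true_and,
                Bool.false_and, Bool.false_eq_true, if_false, if_true]

theorem extract_patch_url_github_first_spec : Claim_equal_extract_patch_url_github_first := by
  intro patch_urls ignored_urls _
  unfold Spec_extract_patch_url_github_first extract_patch_url_github_first extract_patch_url_github_first_alt
  by_cases h : patch_urls = []
  · simp [h]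
  · simp [h, pvAltGo_eq]
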